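-- pv_equiv track=rewrite | github.com/maxshchurr/leeeetcode | LeetCode_python/Easy/2363. Merge Similar Items.py | mergeSimilarItems
-- ===== SOURCE A (Python) =====
-- def mergeSimilarItems(items1: list[list[int]], items2: list[list[int]]) -> list[list[int]]:
--     quantities = {}
--
--     for item in items1:
--         key, value = item[0], item[1]
--         quantities[key] = quantities.get(key, 0) + value
--
--     for item in items2:
--         key, value = item[0], item[1]
--         quantities[key] = quantities.get(key, 0) + value
--
--     merged_items = [[key, value] for key, value in quantities.items()]
--
--     return sorted(merged_items)
-- ===== SOURCE B (Python) =====
-- def mergeSimilarItems(items1: list[list[int]], items2: list[list[int]]) -> list[list[int]]: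
--     combined = sorted(items1 + items2, key=lambda item: item[0])
--     merged = []
--     for item in combined:
--         key, value = item[0], item[1]
--         if merged and merged[-1][0] == key:
--             merged[-1][1] += value
--         else:
--             merged.append([key, value])
--     return merged
-- ===== Notes on version B (the rewrite author's own statement) =====
-- stated objective: alternative
-- what changed: B builds no frequency dict: it sorts the concatenated item lists by key once and coalesces adjacent equal-key runs in a single pass, emitting the sorted [key, total] pairs directly.
import Mathlib
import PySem

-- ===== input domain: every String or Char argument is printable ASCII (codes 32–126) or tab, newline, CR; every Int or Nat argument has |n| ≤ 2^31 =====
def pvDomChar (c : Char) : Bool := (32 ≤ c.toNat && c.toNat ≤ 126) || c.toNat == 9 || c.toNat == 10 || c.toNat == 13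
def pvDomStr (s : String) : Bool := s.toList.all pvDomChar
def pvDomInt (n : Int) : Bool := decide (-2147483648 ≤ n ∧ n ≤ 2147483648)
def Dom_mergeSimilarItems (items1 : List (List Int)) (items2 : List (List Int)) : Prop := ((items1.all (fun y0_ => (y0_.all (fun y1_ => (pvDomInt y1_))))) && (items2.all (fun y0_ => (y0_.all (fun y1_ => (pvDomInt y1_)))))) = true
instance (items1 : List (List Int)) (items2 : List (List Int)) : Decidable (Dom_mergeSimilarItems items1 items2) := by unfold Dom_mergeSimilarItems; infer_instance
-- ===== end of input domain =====

-- B replaces A's frequency dict by sort-then-coalesce: sort the concatenated items by key once,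
-- then sum adjacent equal-key runs in a single pass (alternative algorithm, same O(n log n) cost).


-- ===== PORT A =====
-- quantities[key] = quantities.get(key, 0) + value  (item[0]/item[1] are exact under Pre_, which demands 2 ≤ length)
def pvAccum (d : PySem.Dict Int Int) (item : List Int) : PySem.Dict Int Int :=
  d.insert (PySem.List.pyGetD item 0 0)
    (d.getD (PySem.List.pyGetD item 0 0) 0 + PySem.List.pyGetD item 1 0)

def mergeSimilarItems (items1 : List (List Int)) (items2 : List (List Int)) : List (List Int) :=
  let q1 := items1.foldl pvAccum PySem.Dict.empty
  let q2 := items2.foldl pvAccum q1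
  let merged := q2.items.map (fun kv => [kv.1, kv.2])
  PySem.List.sorted merged (fun x => x) false

-- ===== PORT B =====
-- one iteration of B's coalescing loop: merge into the last pair if it has the same key, else append
def pvStep (merged : List (List Int)) (item : List Int) : List (List Int) :=
  match merged.getLast? with
  | some last =>
      if PySem.List.pyGetD last 0 0 == PySem.List.pyGetD item 0 0 then
        merged.dropLast ++ [[PySem.List.pyGetD last 0 0,
                             PySem.List.pyGetD last 1 0 + PySem.List.pyGetD item 1 0]]
      else merged ++ [[PySem.List.pyGetD item 0 0, PySem.List.pyGetD item 1 0]]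
  | none => merged ++ [[PySem.List.pyGetD item 0 0, PySem.List.pyGetD item 1 0]]

def mergeSimilarItems_alt (items1 : List (List Int)) (items2 : List (List Int)) : List (List Int) :=
  let combined := PySem.List.sorted (items1 ++ items2) (fun item => PySem.List.pyGetD item 0 0) false
  combined.foldl pvStep []

-- ===== PRECONDITION & SPEC =====
-- Pre_ excludes inputs containing an item list with fewer than 2 entries: there both Pythons raise IndexError on item[0]/item[1].
def Pre_mergeSimilarItems (items1 : List (List Int)) (items2 : List (List Int)) : Prop :=
  (∀ l ∈ items1, 2 ≤ l.length) ∧ (∀ l ∈ items2, 2 ≤ l.length)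
instance (items1 : List (List Int)) (items2 : List (List Int)) : Decidable (Pre_mergeSimilarItems items1 items2) := by unfold Pre_mergeSimilarItems; infer_instance
def pvWitness_mergeSimilarItems : List (List Int) × List (List Int) := ([[1, 2], [3, 4]], [[1, 5]])

def Spec_mergeSimilarItems (items1 : List (List Int)) (items2 : List (List Int)) (out : List (List Int)) : Prop := out = mergeSimilarItems_alt items1 items2
instance (items1 : List (List Int)) (items2 : List (List Int)) (out : List (List Int)) : Decidable (Spec_mergeSimilarItems items1 items2 out) := by unfold Spec_mergeSimilarItems; infer_instance

-- ===== CLAIM (what is proved, stated in full; the proofs are below) =====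
def Claim_equal_mergeSimilarItems : Prop := ∀ (items1 : List (List Int)) (items2 : List (List Int)), Dom_mergeSimilarItems items1 items2 → Pre_mergeSimilarItems items1 items2 → Spec_mergeSimilarItems items1 items2 (mergeSimilarItems items1 items2)

-- ===== LEMMAS AND PROOFS =====

-- key and value of an item, and the total value of a key in a list of items
def pvK (p : List Int) : Int := PySem.List.pyGetD p 0 0
def pvV (p : List Int) : Int := PySem.List.pyGetD p 1 0
def pvS (l : List (List Int)) (k : Int) : Int := ((l.filter (fun p => pvK p == k)).map pvV).sum

theorem pvS_nil (k : Int) : pvS [] k = 0 := rfl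

theorem pvS_cons (p : List Int) (t : List (List Int)) (k : Int) :
    pvS (p :: t) k = (if pvK p = k then pvV p else 0) + pvS t k := by
  by_cases h : pvK p = k
  · simp [pvS, h]
  · simp [pvS, h]

-- ---- A side ----
theorem pv_getD_foldl_accum (l : List (List Int)) (d : PySem.Dict Int Int) (x : Int) :
    (l.foldl pvAccum d).getD x 0 = d.getD x 0 + pvS l x := by
  induction l generalizing d with
  | nil => simp [pvS_nil]
  | cons p t ih =>
      rw [List.foldl_cons, ih, pvS_cons]
      have hacc : (pvAccum d p).getD x 0 =
          if x = pvK p then d.getD (pvK p) 0 + pvV p else d.getD x 0 :=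
        PySem.Dict.getD_insert d (pvK p) x (d.getD (pvK p) 0 + pvV p) 0
      rw [hacc]
      by_cases h : x = pvK p
      · rw [if_pos h, if_pos h.symm, h]; ring
      · rw [if_neg h, if_neg (fun hh => h hh.symm)]; ring

theorem pv_keys_foldl_accum (l : List (List Int)) (d : PySem.Dict Int Int) :
    (l.foldl pvAccum d).keys = PySem.Set.update d.keys (l.map pvK) := by
  have h : pvAccum = fun (d : PySem.Dict Int Int) x =>
      d.insert (pvK x) (d.getD (pvK x) 0 + pvV x) := rfl
  rw [h, PySem.Dict.keys_foldl_insert_key]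

theorem pv_nodup_keys_foldl_accum (l : List (List Int)) (d : PySem.Dict Int Int)
    (h : d.keys.Nodup) : (l.foldl pvAccum d).keys.Nodup := by
  have he : pvAccum = fun (d : PySem.Dict Int Int) x =>
      d.insert (pvK x) (d.getD (pvK x) 0 + pvV x) := rfl
  rw [he]
  exact PySem.Dict.nodup_keys_foldl_insert_key l pvK _ d h

-- A's result is the first-occurrence key set mapped to [key, total], then sorted
theorem pv_mergeA (items1 items2 : List (List Int)) :
    mergeSimilarItems items1 items2 =
      PySem.List.sorted
        ((PySem.Set.ofList ((items1 ++ items2).map pvK)).map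
          (fun k => [k, pvS (items1 ++ items2) k]))
        (fun x => x) false := by
  show PySem.List.sorted
      ((List.foldl pvAccum (List.foldl pvAccum PySem.Dict.empty items1) items2).items.map
        (fun kv => [kv.1, kv.2])) (fun x => x) false = _
  rw [← List.foldl_append]
  congr 1
  rw [PySem.Dict.items_eq_map_keys _ (pv_nodup_keys_foldl_accum _ _ PySem.Dict.nodup_keys_empty) 0]
  rw [pv_keys_foldl_accum]
  have hupd : PySem.Set.update (PySem.Dict.empty : PySem.Dict Int Int).keys
      ((items1 ++ items2).map pvK) = PySem.Set.ofList ((items1 ++ items2).map pvK) := rfl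
  rw [hupd, List.map_map]
  refine List.map_congr_left (fun k _ => ?_)
  simp only [Function.comp_apply]
  rw [pv_getD_foldl_accum, PySem.Dict.getD_empty, zero_add]

-- ---- B side ----
theorem pvStep_ne_nil (l : List (List Int)) (p : List Int) : pvStep l p ≠ [] := by
  unfold pvStep
  cases h : l.getLast? <;> simp
  split_ifs <;> simp

theorem pvStep_snoc (ys : List (List Int)) (x : List Int) (p : List Int) :
    pvStep (ys ++ [x]) p = ys ++ pvStep [x] p := by
  unfold pvStep
  have h1 : ([x] : List (List Int)).getLast? = some x := rfl
  have h2 : ([x] : List (List Int)).dropLast = [] := rfl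
  simp only [List.getLast?_concat, List.dropLast_concat, h1, h2]
  split_ifs <;> simp

theorem pvStep_append (pre l : List (List Int)) (p : List Int) (h : l ≠ []) :
    pvStep (pre ++ l) p = pre ++ pvStep l p := by
  rcases List.eq_nil_or_concat l with rfl | ⟨L, b, rfl⟩
  · exact absurd rfl h
  · rw [List.concat_eq_append, ← List.append_assoc, pvStep_snoc, pvStep_snoc,
      List.append_assoc]

theorem pv_foldl_step_append (g : List (List Int)) (pre l : List (List Int)) (h : l ≠ []) :
    g.foldl pvStep (pre ++ l) = pre ++ g.foldl pvStep l := by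
  induction g generalizing l with
  | nil => simp
  | cons p t ih =>
      rw [List.foldl_cons, List.foldl_cons, pvStep_append pre l p h,
        ih (pvStep l p) (pvStep_ne_nil l p)]

theorem pvStep_single (k0 v0 : Int) (p : List Int) :
    pvStep [[k0, v0]] p =
      if pvK p = k0 then [[k0, v0 + pvV p]] else [[k0, v0], [pvK p, pvV p]] := by
  show (if (k0 == pvK p) = true then [[k0, v0 + pvV p]] else [[k0, v0], [pvK p, pvV p]]) = _
  by_cases h : pvK p = k0
  · have hb : (k0 == pvK p) = true := beq_iff_eq.mpr h.symm
    simp [h]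
  · have hb : (k0 == pvK p) = false := beq_eq_false_iff_ne.mpr (fun hh => h hh.symm)
    simp [hb, h]

theorem pvStep_nil (p : List Int) : pvStep [] p = [[pvK p, pvV p]] := rfl

theorem pv_run (g : List (List Int)) (k0 v0 : Int)
    (hpw : g.Pairwise (fun a b => pvK a ≤ pvK b)) (hlb : ∀ p ∈ g, k0 ≤ pvK p) :
    g.foldl pvStep [[k0, v0]] =
      [k0, v0 + pvS g k0] :: (g.filter (fun p => !(pvK p == k0))).foldl pvStep [] := by
  induction g generalizing v0 with
  | nil => simp [pvS_nil]
  | cons p t ih =>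
      rw [List.foldl_cons, pvStep_single]
      by_cases hk : pvK p = k0
      · rw [if_pos hk, ih (v0 + pvV p) (List.Pairwise.of_cons hpw)
            (fun q hq => hlb q (List.mem_cons_of_mem p hq)), pvS_cons, if_pos hk]
        have hfil : (p :: t).filter (fun q => !(pvK q == k0)) =
            t.filter (fun q => !(pvK q == k0)) := by
          simp [hk]
        rw [hfil]
        ring_nf
      · rw [if_neg hk]
        have hlt : k0 < pvK p :=
          lt_of_le_of_ne (hlb p (List.mem_cons_self)) (fun h => hk h.symm)
        have hnotk : ∀ q ∈ t, pvK q ≠ k0 := by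
          intro q hq h
          have := (List.pairwise_cons.mp hpw).1 q hq
          omega
        have hSt : pvS t k0 = 0 := by
          have hf : t.filter (fun q => pvK q == k0) = [] := by
            apply List.filter_eq_nil_iff.mpr
            intro q hq; simpa using hnotk q hq
          simp [pvS, hf]
        have hfil : (p :: t).filter (fun q => !(pvK q == k0)) = p :: t := by
          apply List.filter_eq_self.mpr
          intro q hq
          rcases List.mem_cons.mp hq with rfl | hq'
          · simpa using hk
          · simpa using hnotk q hq'
        have hsplit : ([[k0, v0], [pvK p, pvV p]] : List (List Int)) =
            [[k0, v0]] ++ [[pvK p, pvV p]] := rfl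
        rw [hsplit, pv_foldl_step_append t [[k0, v0]] [[pvK p, pvV p]] (by simp),
          pvS_cons, if_neg hk, hSt, hfil, List.foldl_cons, pvStep_nil]
        simp

-- discard is a filter, and it commutes with building a first-occurrence set
theorem pv_discard_eq (s : PySem.Set Int) (a : Int) :
    s.discard a = s.filter (fun y => !(y == a)) := rfl

theorem pv_filter_ofList (xs : List Int) (a : Int) :
    (PySem.Set.ofList xs : List Int).filter (fun y => !(y == a)) =
      PySem.Set.ofList (xs.filter (fun x => !(x == a))) := by
  induction xs with
  | nil => rfl
  | cons x t ih =>
      rw [PySem.Set.ofList_cons, pv_discard_eq]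
      by_cases hx : x = a
      · subst hx
        have hRHS : PySem.Set.ofList ((x :: t).filter (fun y => !(y == x))) =
            PySem.Set.ofList (t.filter (fun y => !(y == x))) := by
          congr 1; simp
        have hhead : ((x :: (PySem.Set.ofList t : List Int).filter (fun y => !(y == x))).filter
            (fun y => !(y == x))) =
            ((PySem.Set.ofList t : List Int).filter (fun y => !(y == x))).filter
              (fun y => !(y == x)) := by
          simp
        rw [hRHS, ← ih, hhead, List.filter_filter]
        apply List.filter_congr
        intro y _
        rw [Bool.and_self]
      · have hfc1 : (x :: (PySem.Set.ofList t : List Int).filter (fun y => !(y == x))).filter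
            (fun y => !(y == a)) =
            x :: ((PySem.Set.ofList t : List Int).filter (fun y => !(y == x))).filter
              (fun y => !(y == a)) := by
          simp [hx]
        have hfc2 : (x :: t).filter (fun y => !(y == a)) = x :: t.filter (fun y => !(y == a)) := by
          simp [hx]
        rw [hfc1, hfc2, PySem.Set.ofList_cons, pv_discard_eq, ← ih,
          List.filter_filter, List.filter_filter]
        congr 1
        apply List.filter_congr
        intro y _
        rw [Bool.and_comm]

theorem pvS_filter_ne (t : List (List Int)) (k0 k : Int) (h : k ≠ k0) :
    pvS (t.filter (fun q => !(pvK q == k0))) k = pvS t k := by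
  unfold pvS
  rw [List.filter_filter]
  congr 2
  apply List.filter_congr
  intro q _
  by_cases h1 : pvK q = k0
  · simp [h1]
    exact fun hh => h hh.symm
  · simp [h1]

theorem pv_coalesce (g : List (List Int)) (hpw : g.Pairwise (fun a b => pvK a ≤ pvK b)) :
    g.foldl pvStep [] =
      (PySem.Set.ofList (g.map pvK)).map (fun k => [k, pvS g k]) := by
  induction hn : g.length using Nat.strong_induction_on generalizing g with
  | _ n ih =>
    cases g with
    | nil => rfl
    | cons p t =>
      have hlb : ∀ q ∈ t, pvK p ≤ pvK q := (List.pairwise_cons.mp hpw).1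
      rw [List.foldl_cons, pvStep_nil,
        pv_run t (pvK p) (pvV p) (List.Pairwise.of_cons hpw) hlb]
      have hlen : (t.filter (fun q => !(pvK q == pvK p))).length < n := by
        have := List.length_filter_le (fun q => !(pvK q == pvK p)) t
        simp at hn; omega
      have hpwf : (t.filter (fun q => !(pvK q == pvK p))).Pairwise
          (fun a b => pvK a ≤ pvK b) :=
        List.Pairwise.filter _ (List.Pairwise.of_cons hpw)
      rw [ih _ hlen _ hpwf rfl, List.map_cons, PySem.Set.ofList_cons, List.map_cons]
      congr 1
      · rw [pvS_cons, if_pos rfl]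
      · rw [pv_discard_eq, pv_filter_ofList]
        have hmapfil : (t.map pvK).filter (fun x => !(x == pvK p)) =
            (t.filter (fun q => !(pvK q == pvK p))).map pvK := by
          rw [List.filter_map]; rfl
        rw [hmapfil]
        refine List.map_congr_left (fun k hk => ?_)
        have hk' : k ∈ (t.filter (fun q => !(pvK q == pvK p))).map pvK :=
          (PySem.Set.mem_ofList _ _).mp hk
        have hkne : k ≠ pvK p := by
          rcases List.mem_map.mp hk' with ⟨q, hq, rfl⟩
          have := List.of_mem_filter hq
          simpa using this
        rw [pvS_filter_ne t (pvK p) k hkne, pvS_cons, if_neg (fun h => hkne h.symm), zero_add]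

-- ---- assembling: both sides are the sorted [key, total] table ----
theorem pv_cons_lt_cons (a b c d : Int) (h : a < b) : [a, c] < [b, d] :=
  List.cons_lt_cons_iff.mpr (Or.inl h)

theorem pv_ofList_pairwise_lt (xs : List Int) (h : xs.Pairwise (· ≤ ·)) :
    (PySem.Set.ofList xs : List Int).Pairwise (· < ·) := by
  induction xs with
  | nil => exact List.Pairwise.nil
  | cons x t ih =>
      rw [PySem.Set.ofList_cons]
      refine List.pairwise_cons.mpr ⟨?_, ?_⟩
      · intro y hy
        have hmem := (PySem.Set.mem_discard _ _ _).mp hy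
        have hyx : y ∈ t := (PySem.Set.mem_ofList _ _).mp hmem.1
        exact lt_of_le_of_ne ((List.pairwise_cons.mp h).1 y hyx) (fun he => hmem.2 he.symm)
      · rw [pv_discard_eq]
        exact List.Pairwise.filter _ (ih (List.Pairwise.of_cons h))

-- the two DecidableLT bundles on List Int sort identically
theorem pv_sorted_inst (xs : List (List Int)) (key : List Int → List Int) :
    @PySem.List.sorted (List Int) (List Int) List.instLT (fun a b => a.decidableLT b)
        xs key false
      = @PySem.List.sorted _ _ List.instLinearOrder.toLT LinearOrder.toDecidableLT
          xs key false := by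
  rw [@PySem.List.sorted_eq_foldl_insertBy, @PySem.List.sorted_eq_foldl_insertBy]
  congr 1
  funext acc x
  congr 1
  funext a b
  exact decide_eq_decide.mpr Iff.rfl

theorem pv_main (items1 items2 : List (List Int)) :
    mergeSimilarItems items1 items2 = mergeSimilarItems_alt items1 items2 := by
  set all := items1 ++ items2 with hall
  set g := PySem.List.sorted all (fun item => PySem.List.pyGetD item 0 0) false with hg
  have hgK : g = PySem.List.sorted all pvK false := rfl
  have hperm : g.Perm all := by rw [hgK]; exact PySem.List.sorted_perm all pvK false
  have hpw : g.Pairwise (fun a b => pvK a ≤ pvK b) := by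
    rw [hgK]; exact PySem.List.sorted_pairwise all pvK
  have hS : ∀ k, pvS g k = pvS all k := by
    intro k
    unfold pvS
    rw [List.Perm.sum_eq (List.Perm.map pvV (List.Perm.filter _ hperm))]
  have hB : mergeSimilarItems_alt items1 items2 =
      (PySem.Set.ofList (g.map pvK)).map (fun k => [k, pvS all k]) := by
    show g.foldl pvStep [] = _
    rw [pv_coalesce g hpw]
    exact List.map_congr_left (fun k _ => by rw [hS k])
  have hsetperm : (PySem.Set.ofList (g.map pvK) : List Int).Perm
      (PySem.Set.ofList (all.map pvK)) := by
    apply (List.perm_ext_iff_of_nodup (PySem.Set.nodup_ofList _) (PySem.Set.nodup_ofList _)).mpr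
    intro k
    rw [PySem.Set.mem_ofList, PySem.Set.mem_ofList]
    exact (hperm.map pvK).mem_iff
  have hpwlt : ((PySem.Set.ofList (g.map pvK)).map
      (fun k => [k, pvS all k])).Pairwise (fun a b => a < b) := by
    refine List.pairwise_map.mpr
      (List.Pairwise.imp ?_ (pv_ofList_pairwise_lt (g.map pvK) (List.pairwise_map.mpr hpw)))
    intro a b hab
    exact pv_cons_lt_cons a b (pvS all a) (pvS all b) hab
  rw [pv_mergeA, ← hall, hB, pv_sorted_inst]
  exact PySem.List.sorted_eq_of_perm_of_pairwise_lt _ _ _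
    (List.Perm.map _ hsetperm) hpwlt

-- ===== VERDICT (by name: the statement is the Claim_ definition above) =====
theorem mergeSimilarItems_spec : Claim_equal_mergeSimilarItems := by
  intro items1 items2 _ _
  unfold Spec_mergeSimilarItems
  exact pv_main items1 items2
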